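-- pv_equiv track=rewrite | github.com/tigantic/physics-os | experiments/lux/lUX/scripts/generate_domain_packs.py | _domain_id_to_pack_id
-- ===== SOURCE A (Python) =====
-- def _domain_id_to_pack_id(domain_id: str, name: str) -> str:
--     """Convert 'II.2' + 'Euler 3D' → 'com.physics.euler_3d'."""
--     slug = (
--         name.lower()
--         .replace("/", "_")
--         .replace(" ", "_")
--         .replace("-", "_")
--         .replace("(", "")
--         .replace(")", "")
--         .replace(",", "")
--         .replace("'", "")
--         .replace(".", "")
--         .replace("+", "plus")
--     )
--     # Remove multiple underscores and trailing underscores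
--     while "__" in slug:
--         slug = slug.replace("__", "_")
--     slug = slug.strip("_")
--     return f"com.physics.{slug}"
-- ===== SOURCE B (Python) =====
-- def _domain_id_to_pack_id(domain_id: str, name: str) -> str:
--     """Convert 'II.2' + 'Euler 3D' → 'com.physics.euler_3d'."""
--     out = []
--     for ch in name:
--         c = ch.lower()
--         if c in "/ -_":
--             # collapse underscore runs while building
--             if not (out and out[-1] == "_"):
--                 out.append("_")
--         elif c in "(),'.":
--             pass
--         elif c == "+":
--             out += "plus"
--         else:
--             out.append(c)
--     slug = "".join(out).strip("_")
--     return f"com.physics.{slug}"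
-- ===== Notes on version B (the rewrite author's own statement) =====
-- stated objective: simpler
-- what changed: Replaces A's chain of nine .replace() passes plus a repeated replace("__","_") while-loop with a single left-to-right pass that classifies each character and collapses underscore runs while building the slug.
import Mathlib
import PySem

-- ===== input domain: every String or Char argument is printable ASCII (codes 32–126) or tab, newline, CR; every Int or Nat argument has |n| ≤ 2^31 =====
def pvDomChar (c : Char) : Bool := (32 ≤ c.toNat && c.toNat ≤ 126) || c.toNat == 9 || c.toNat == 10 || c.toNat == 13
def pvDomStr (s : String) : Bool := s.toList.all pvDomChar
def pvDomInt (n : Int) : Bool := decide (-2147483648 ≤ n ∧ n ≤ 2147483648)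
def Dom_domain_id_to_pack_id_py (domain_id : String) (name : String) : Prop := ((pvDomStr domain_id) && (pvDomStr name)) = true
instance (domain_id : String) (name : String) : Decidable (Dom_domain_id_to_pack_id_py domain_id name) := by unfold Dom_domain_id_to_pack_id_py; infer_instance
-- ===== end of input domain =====

-- B replaces A's chain of ten .replace() passes plus a while-loop collapse with ONE
-- left-to-right pass that classifies each character and collapses '_' runs as it builds (objective: simpler).

-- ===== PORT A =====
-- `while "__" in slug: slug = slug.replace("__", "_")`; the fuel argument only makes the
-- loop total (each iteration shortens the string, so fuel = initial length always suffices).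
def pyCollapseA : Nat → String → String
  | 0, slug => slug
  | fuel + 1, slug =>
    if PySem.Str.isIn "__" slug then pyCollapseA fuel (PySem.Str.replace slug "__" "_")
    else slug

def domain_id_to_pack_id_py (domain_id : String) (name : String) : String :=
  let slug :=
    PySem.Str.replace (PySem.Str.replace (PySem.Str.replace (PySem.Str.replace (PySem.Str.replace (PySem.Str.replace (PySem.Str.replace (PySem.Str.replace (PySem.Str.replace (PySem.Str.lower name) "/" "_") " " "_") "-" "_") "(" "") ")" "") "," "") "'" "") "." "") "+" "plus"
  let slug := pyCollapseA slug.toList.length slug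
  let slug := PySem.Str.stripChars slug "_"
  "com.physics." ++ slug

-- ===== PORT B =====
-- one pass over name, building the output back-to-front in `acc`
def altLoop : List Char → List Char → List Char
  | [], acc => acc.reverse
  | ch :: t, acc =>
    let c := PySem.Chars.lowerChar ch
    if c = '/' ∨ c = ' ' ∨ c = '-' ∨ c = '_' then
      if acc.head? = some '_' then altLoop t acc else altLoop t ('_' :: acc)
    else if c = '(' ∨ c = ')' ∨ c = ',' ∨ c = '\'' ∨ c = '.' then altLoop t acc
    else if c = '+' then altLoop t ('s' :: 'u' :: 'l' :: 'p' :: acc)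
    else altLoop t (c :: acc)

def domain_id_to_pack_id_py_alt (domain_id : String) (name : String) : String :=
  let slug := PySem.Chars.stripChars (altLoop name.toList []) ['_']
  "com.physics." ++ String.ofList slug

-- ===== PRECONDITION & SPEC =====
def Spec_domain_id_to_pack_id_py (domain_id : String) (name : String) (out : String) : Prop := out = domain_id_to_pack_id_py_alt domain_id name
instance (domain_id : String) (name : String) (out : String) : Decidable (Spec_domain_id_to_pack_id_py domain_id name out) := by unfold Spec_domain_id_to_pack_id_py; infer_instance

-- ===== CLAIM (what is proved, stated in full; the proofs are below) =====
def Claim_equal_domain_id_to_pack_id_py : Prop := ∀ (domain_id : String) (name : String), Dom_domain_id_to_pack_id_py domain_id name → Spec_domain_id_to_pack_id_py domain_id name (domain_id_to_pack_id_py domain_id name)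

-- ===== LEMMAS AND PROOFS =====

-- per (lowered) character contribution of A's replace chain
def fmap (c : Char) : List Char :=
  if c = '/' ∨ c = ' ' ∨ c = '-' then ['_']
  else if c = '(' ∨ c = ')' ∨ c = ',' ∨ c = '\'' ∨ c = '.' then []
  else if c = '+' then ['p', 'l', 'u', 's']
  else [c]

-- single-character replace as a flatMap
def repC (a : Char) (new : List Char) (s : List Char) : List Char :=
  s.flatMap (fun c => if c = a then new else [c])

-- one pass of replace("__", "_")
def ddRep : List Char → List Char
  | [] => []
  | [c] => [c]
  | c :: d :: t => if c = '_' ∧ d = '_' then '_' :: ddRep t else c :: ddRep (d :: t)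

-- does the list contain two adjacent underscores?
def hasDD : List Char → Bool
  | [] => false
  | [_] => false
  | c :: d :: t => (c = '_' ∧ d = '_') || hasDD (d :: t)

-- collapse runs of '_' to a single '_'; the flag says "last emitted char was '_'"
def cA : Bool → List Char → List Char
  | _, [] => []
  | b, c :: t => if c = '_' then (if b then cA true t else '_' :: cA true t) else c :: cA false t

lemma cA_us_t (t : List Char) : cA true ('_' :: t) = cA true t := by simp [cA]

lemma cA_us_f (t : List Char) : cA false ('_' :: t) = '_' :: cA true t := by simp [cA]

lemma cA_ch (b : Bool) (c : Char) (t : List Char) (h : ¬ c = '_') :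
    cA b (c :: t) = c :: cA false t := by simp [cA, h]

lemma replace_single_go (a : Char) (new : List Char) :
    ∀ (fuel : Nat) (s acc : List Char), s.length ≤ fuel →
      PySem.Chars.replace.go [a] new fuel s acc = acc.reverse ++ repC a new s := by
  intro fuel
  induction fuel with
  | zero =>
    intro s acc h
    have : s = [] := List.eq_nil_of_length_eq_zero (Nat.le_zero.mp h)
    subst this; simp [PySem.Chars.replace.go, repC]
  | succ f ih =>
    intro s acc h
    cases s with
    | nil => simp [PySem.Chars.replace.go, repC]
    | cons c t =>
      by_cases hc : c = a
      · subst hc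
        have hp : List.isPrefixOf [c] (c :: t) = true := by
          simp [List.isPrefixOf]
        simp only [PySem.Chars.replace.go, hp, if_pos]
        rw [show List.drop [c].length (c :: t) = t from rfl, ih t _ (by simpa using Nat.le_of_succ_le_succ h)]
        simp [repC]
      · have hp : List.isPrefixOf [a] (c :: t) = false := by
          simp [List.isPrefixOf, hc]
          intro h'; exact absurd h'.symm hc
        simp only [PySem.Chars.replace.go, hp, Bool.false_eq_true, if_neg, not_false_iff]
        rw [ih t _ (by simpa using Nat.le_of_succ_le_succ h)]
        simp [repC, hc]

lemma replace_single (a : Char) (new s : List Char) :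
    PySem.Chars.replace s [a] new = repC a new s := by
  simp [PySem.Chars.replace, replace_single_go a new s.length s [] le_rfl]

lemma repC_append (a : Char) (new x y : List Char) :
    repC a new (x ++ y) = repC a new x ++ repC a new y := by
  simp [repC]

-- the full chain of single-character replaces, on an already-lowered list
def chainF (l : List Char) : List Char :=
  repC '+' ['p','l','u','s'] (repC '.' [] (repC '\'' [] (repC ',' [] (repC ')' []
    (repC '(' [] (repC '-' ['_'] (repC ' ' ['_'] (repC '/' ['_'] l))))))))

lemma chainF_append (x y : List Char) : chainF (x ++ y) = chainF x ++ chainF y := by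
  simp [chainF, repC_append]

lemma chainF_single (c : Char) : chainF [c] = fmap c := by
  unfold fmap
  split_ifs with h1 h2 h3
  · rcases h1 with h | h | h <;> subst h <;> decide
  · rcases h2 with h | h | h | h | h <;> subst h <;> decide
  · subst h3; decide
  · push_neg at h1 h2
    simp [chainF, repC, h1.1, h1.2.1, h1.2.2, h2.1, h2.2.1, h2.2.2.1, h2.2.2.2.1,
      h2.2.2.2.2, h3]

lemma chainF_eq (l : List Char) : chainF l = l.flatMap fmap := by
  induction l with
  | nil => decide
  | cons c t ih =>
    have : (c :: t) = [c] ++ t := rfl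
    rw [this, chainF_append, List.flatMap_append, chainF_single, ih]
    simp

lemma replace_dd_go :
    ∀ (fuel : Nat) (s acc : List Char), s.length ≤ fuel →
      PySem.Chars.replace.go ['_','_'] ['_'] fuel s acc = acc.reverse ++ ddRep s := by
  intro fuel
  induction fuel with
  | zero =>
    intro s acc h
    have : s = [] := List.eq_nil_of_length_eq_zero (Nat.le_zero.mp h)
    subst this; simp [PySem.Chars.replace.go, ddRep]
  | succ f ih =>
    intro s acc h
    match s with
    | [] => simp [PySem.Chars.replace.go, ddRep]
    | [c] =>
      have hp : List.isPrefixOf ['_','_'] [c] = false := by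
        simp [List.isPrefixOf]
      simp only [PySem.Chars.replace.go, hp, Bool.false_eq_true, if_neg, not_false_iff]
      cases f <;> simp [PySem.Chars.replace.go, ddRep]
    | c :: d :: t =>
      by_cases hcd : c = '_' ∧ d = '_'
      · obtain ⟨hc, hd⟩ := hcd; subst hc; subst hd
        have hp : List.isPrefixOf ['_','_'] ('_' :: '_' :: t) = true := by
          simp [List.isPrefixOf]
        simp only [PySem.Chars.replace.go, hp, if_pos]
        rw [show List.drop (['_','_'] : List Char).length ('_' :: '_' :: t) = t from rfl,
          ih t _ (by simp at h; omega)]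
        simp [ddRep]
      · have hp : List.isPrefixOf ['_','_'] (c :: d :: t) = false := by
          simp [List.isPrefixOf]
          intro h1 h2; exact hcd ⟨h1.symm, h2.symm⟩
        simp only [PySem.Chars.replace.go, hp, Bool.false_eq_true, if_neg, not_false_iff]
        rw [ih (d :: t) _ (by simp at h ⊢; omega)]
        rw [show ddRep (c :: d :: t) = c :: ddRep (d :: t) from by simp [ddRep, hcd]]
        simp

lemma replace_dd (s : List Char) :
    PySem.Chars.replace s ['_','_'] ['_'] = ddRep s := by
  simp [PySem.Chars.replace, replace_dd_go s.length s [] le_rfl]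

lemma find_go_dd : ∀ (s : List Char) (k : Nat),
    (PySem.Chars.find.go ['_','_'] s k != -1) = hasDD s := by
  intro s
  induction s with
  | nil => intro k; simp [PySem.Chars.find.go, hasDD, List.isEmpty]
  | cons c t ih =>
    intro k
    by_cases hp : List.isPrefixOf ['_','_'] (c :: t) = true
    · cases t with
      | nil => simp [List.isPrefixOf] at hp
      | cons d t' =>
        simp only [List.isPrefixOf, Bool.and_eq_true, beq_iff_eq,
          List.isPrefixOf_nil_left, and_true] at hp
        obtain ⟨h1, h2⟩ := hp
        subst h1; subst h2
        have hp2 : List.isPrefixOf ['_','_'] ('_' :: '_' :: t') = true := by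
          simp [List.isPrefixOf]
        simp only [PySem.Chars.find.go]
        rw [if_pos hp2]
        have hk : ((k : Int) != -1) = true := by simp
        rw [hk]; simp [hasDD]
    · simp only [PySem.Chars.find.go]
      rw [if_neg hp, ih (k + 1)]
      cases t with
      | nil => simp [hasDD]
      | cons d t' =>
        have : ¬(c = '_' ∧ d = '_') := by
          intro ⟨h1, h2⟩; subst h1; subst h2
          exact hp (by simp [List.isPrefixOf])
        simp [hasDD, this]

lemma isIn_dd (s : List Char) : PySem.Chars.isIn ['_','_'] s = hasDD s := by
  simp [PySem.Chars.isIn, PySem.Chars.find, find_go_dd]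

lemma ddRep_length_le (s : List Char) : (ddRep s).length ≤ s.length := by
  fun_induction ddRep s with
  | case1 => simp [ddRep]
  | case2 c => simp [ddRep]
  | case3 c d t h ih => simp at ih ⊢; omega
  | case4 c d t h ih => simp at ih ⊢; omega

lemma ddRep_length_lt (s : List Char) (h : hasDD s = true) :
    (ddRep s).length < s.length := by
  fun_induction ddRep s with
  | case1 => simp [hasDD] at h
  | case2 c => simp [hasDD] at h
  | case3 c d t hcd ih =>
    have := ddRep_length_le t
    simp at this ⊢; omega
  | case4 c d t hcd ih =>
    have h' : hasDD (d :: t) = true := by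
      simp [hasDD, hcd] at h; simpa [hasDD] using h
    have := ih h'
    simp at this ⊢; omega

lemma cA_ddRep (s : List Char) : ∀ b, cA b (ddRep s) = cA b s := by
  fun_induction ddRep s with
  | case1 => intro b; rfl
  | case2 c => intro b; rfl
  | case3 c d t hcd ih =>
    obtain ⟨hc, hd⟩ := hcd; subst hc; subst hd
    intro b
    cases b
    · rw [cA_us_f, cA_us_f, cA_us_t, ih]
    · rw [cA_us_t, cA_us_t, cA_us_t, ih]
  | case4 c d t hcd ih =>
    intro b
    by_cases hc : c = '_'
    · subst hc
      cases b
      · rw [cA_us_f, cA_us_f, ih]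
      · rw [cA_us_t, cA_us_t, ih]
    · rw [cA_ch b c _ hc, cA_ch b c _ hc, ih]

lemma cA_id (s : List Char) (h : hasDD s = false) :
    cA false s = s ∧ (s.head? ≠ some '_' → cA true s = s) := by
  fun_induction hasDD s with
  | case1 => exact ⟨rfl, fun _ => rfl⟩
  | case2 c =>
    constructor
    · by_cases hc : c = '_' <;> simp [cA, hc]
    · intro hh
      have hc : ¬ c = '_' := by simpa using hh
      simp [cA, hc]
  | case3 c d t ih =>
    simp only [Bool.or_eq_false_iff] at h
    obtain ⟨hcd, hdd⟩ := h
    have hcd' : ¬(c = '_' ∧ d = '_') := by simpa using hcd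
    have ih' := ih hdd
    constructor
    · by_cases hc : c = '_'
      · subst hc
        have hd : ¬ d = '_' := fun hd => hcd' ⟨rfl, hd⟩
        rw [cA_us_f, ih'.2 (by simp [hd])]
      · rw [cA_ch _ _ _ hc, ih'.1]
    · intro hh
      have hc : ¬ c = '_' := by simpa using hh
      rw [cA_ch _ _ _ hc, ih'.1]

lemma collapseA_eq : ∀ (fuel : Nat) (s : String), s.toList.length ≤ fuel →
    (pyCollapseA fuel s).toList = cA false s.toList := by
  intro fuel
  induction fuel with
  | zero =>
    intro s h
    have h0 : s.toList = [] := List.eq_nil_of_length_eq_zero (Nat.le_zero.mp h)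
    simp [pyCollapseA, h0, cA]
  | succ f ih =>
    intro s h
    have hin : PySem.Str.isIn "__" s = hasDD s.toList := by
      rw [show PySem.Str.isIn "__" s = PySem.Chars.isIn ['_','_'] s.toList from rfl, isIn_dd]
    by_cases hdd : hasDD s.toList = true
    · have hlist : (PySem.Str.replace s "__" "_").toList = ddRep s.toList := by
        rw [PySem.Str.toList_replace]
        exact replace_dd s.toList
      have hlen : (PySem.Str.replace s "__" "_").toList.length ≤ f := by
        rw [hlist]
        have := ddRep_length_lt s.toList hdd
        omega
      simp only [pyCollapseA, hin, hdd, if_pos]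
      rw [ih _ hlen, hlist, cA_ddRep]
    · have hdd' : hasDD s.toList = false := by simpa using hdd
      simp only [pyCollapseA, hin, hdd', Bool.false_eq_true, if_neg, not_false_iff]
      exact ((cA_id s.toList hdd').1).symm

lemma altLoop_eq : ∀ (l acc : List Char),
    altLoop l acc = acc.reverse ++ cA (decide (acc.head? = some '_'))
      ((l.map PySem.Chars.lowerChar).flatMap fmap) := by
  intro l
  induction l with
  | nil => intro acc; simp [altLoop, cA]
  | cons ch t ih =>
    intro acc
    simp only [altLoop, List.map_cons, List.flatMap_cons]
    by_cases h1 : PySem.Chars.lowerChar ch = '/' ∨ PySem.Chars.lowerChar ch = ' ' ∨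
        PySem.Chars.lowerChar ch = '-' ∨ PySem.Chars.lowerChar ch = '_'
    · have hf : fmap (PySem.Chars.lowerChar ch) = ['_'] := by
        rcases h1 with h | h | h | h <;> rw [h] <;> rfl
      rw [if_pos h1, hf]
      by_cases hh : acc.head? = some '_'
      · rw [if_pos hh, ih acc]
        simp [cA, hh]
      · rw [if_neg hh, ih ('_' :: acc)]
        simp [cA, hh]
    · rw [if_neg h1]
      by_cases h2 : PySem.Chars.lowerChar ch = '(' ∨ PySem.Chars.lowerChar ch = ')' ∨
          PySem.Chars.lowerChar ch = ',' ∨ PySem.Chars.lowerChar ch = '\'' ∨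
          PySem.Chars.lowerChar ch = '.'
      · have hf : fmap (PySem.Chars.lowerChar ch) = [] := by
          rcases h2 with h | h | h | h | h <;> rw [h] <;> rfl
        rw [if_pos h2, hf, ih acc]
        simp
      · rw [if_neg h2]
        by_cases h3 : PySem.Chars.lowerChar ch = '+'
        · have hf : fmap (PySem.Chars.lowerChar ch) = ['p','l','u','s'] := by rw [h3]; rfl
          have hp' : ∀ b t', cA b ('p' :: t') = 'p' :: cA false t' := fun b t' => cA_ch b 'p' t' (by decide)
          have hl' : ∀ b t', cA b ('l' :: t') = 'l' :: cA false t' := fun b t' => cA_ch b 'l' t' (by decide)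
          have hu' : ∀ b t', cA b ('u' :: t') = 'u' :: cA false t' := fun b t' => cA_ch b 'u' t' (by decide)
          have hs' : ∀ b t', cA b ('s' :: t') = 's' :: cA false t' := fun b t' => cA_ch b 's' t' (by decide)
          rw [if_pos h3, hf, ih ('s' :: 'u' :: 'l' :: 'p' :: acc)]
          simp [hp', hl', hu', hs']
        · have hne : ¬ PySem.Chars.lowerChar ch = '_' := by
            intro h; exact h1 (Or.inr (Or.inr (Or.inr h)))
          have hf : fmap (PySem.Chars.lowerChar ch) = [PySem.Chars.lowerChar ch] := by
            unfold fmap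
            rw [if_neg (by tauto), if_neg h2, if_neg h3]
          rw [if_neg h3, hf, ih (PySem.Chars.lowerChar ch :: acc)]
          simp [cA_ch _ _ _ hne, hne]

-- ===== VERDICT (by name: the statement is the Claim_ definition above) =====
set_option maxRecDepth 4000 in
set_option maxHeartbeats 2000000 in
theorem domain_id_to_pack_id_py_spec : Claim_equal_domain_id_to_pack_id_py := by
  intro domain_id name _
  unfold Spec_domain_id_to_pack_id_py domain_id_to_pack_id_py domain_id_to_pack_id_py_alt
  apply String.toList_inj.mp
  simp only [String.toList_append, String.toList_ofList, PySem.Str.toList_stripChars]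
  rw [show ("_" : String).toList = ['_'] from rfl]
  refine congrArg (fun z => "com.physics.".toList ++ z) ?_
  refine congrArg (fun z => PySem.Chars.stripChars z ['_']) ?_
  rw [collapseA_eq _ _ le_rfl, altLoop_eq]
  simp only [PySem.Str.toList_replace, PySem.Str.toList_lower]
  rw [show ("/" : String).toList = ['/'] from rfl, show (" " : String).toList = [' '] from rfl,
    show ("-" : String).toList = ['-'] from rfl, show ("(" : String).toList = ['('] from rfl,
    show (")" : String).toList = [')'] from rfl, show ("," : String).toList = [','] from rfl,
    show ("'" : String).toList = ['\''] from rfl, show ("." : String).toList = ['.'] from rfl,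
    show ("+" : String).toList = ['+'] from rfl, show ("plus" : String).toList = ['p','l','u','s'] from rfl,
    show ("" : String).toList = [] from rfl, show ("_" : String).toList = ['_'] from rfl]
  rw [replace_single, replace_single, replace_single, replace_single, replace_single,
    replace_single, replace_single, replace_single, replace_single]
  have h := chainF_eq (PySem.Chars.lower name.toList)
  unfold chainF at h
  rw [h, show PySem.Chars.lower name.toList = name.toList.map PySem.Chars.lowerChar from rfl]
  simp [cA]
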